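-- pv_equiv track=rewrite | github.com/zaidmuslim0647/AI_Semester_Project | aeronet_lite/src/fleet_selector.py | _repair_chromosome
-- ===== SOURCE A (Python) =====
-- from typing import Iterable, List, Tuple
--
-- LIGHT_COST = 1000
--
-- HEAVY_COST = 1800
--
-- def _fleet_cost(light_count: int, heavy_count: int) -> int:
--     return light_count * LIGHT_COST + heavy_count * HEAVY_COST
--
-- def _repair_chromosome(light_count: int, heavy_count: int, budget: int) -> Tuple[int, int]:
--     light_count = max(0, light_count)
--     heavy_count = max(0, heavy_count)
--     while _fleet_cost(light_count, heavy_count) > budget and (light_count + heavy_count) > 0: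
--         if heavy_count > 0:
--             heavy_count -= 1
--         elif light_count > 0:
--             light_count -= 1
--     return light_count, heavy_count
-- ===== SOURCE B (Python) =====
-- from typing import Tuple
--
-- LIGHT_COST = 1000
--
-- HEAVY_COST = 1800
--
--
-- def _reduce(light_count: int, heavy_count: int, budget: int) -> Tuple[int, int]:
--     # closed-form: remove the needed number of heavy craft (ceil division),
--     # then, if still over budget, the needed number of light craft.
--     over = light_count * LIGHT_COST + heavy_count * HEAVY_COST - budget
--     if over > 0:
--         k = min(heavy_count, -(-over // HEAVY_COST))
--         heavy_count -= k
--         over -= k * HEAVY_COST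
--         if over > 0:
--             m = min(light_count, -(-over // LIGHT_COST))
--             light_count -= m
--     return light_count, heavy_count
--
--
-- def _repair_chromosome(light_count: int, heavy_count: int, budget: int) -> Tuple[int, int]:
--     return _reduce(max(0, light_count), max(0, heavy_count), budget)
-- ===== Notes on version B (the rewrite author's own statement) =====
-- stated objective: faster
-- what changed: Replaced the one-unit-at-a-time removal loop by closed-form ceiling-division arithmetic computing heavy then light removal counts directly.
import Mathlib
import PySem

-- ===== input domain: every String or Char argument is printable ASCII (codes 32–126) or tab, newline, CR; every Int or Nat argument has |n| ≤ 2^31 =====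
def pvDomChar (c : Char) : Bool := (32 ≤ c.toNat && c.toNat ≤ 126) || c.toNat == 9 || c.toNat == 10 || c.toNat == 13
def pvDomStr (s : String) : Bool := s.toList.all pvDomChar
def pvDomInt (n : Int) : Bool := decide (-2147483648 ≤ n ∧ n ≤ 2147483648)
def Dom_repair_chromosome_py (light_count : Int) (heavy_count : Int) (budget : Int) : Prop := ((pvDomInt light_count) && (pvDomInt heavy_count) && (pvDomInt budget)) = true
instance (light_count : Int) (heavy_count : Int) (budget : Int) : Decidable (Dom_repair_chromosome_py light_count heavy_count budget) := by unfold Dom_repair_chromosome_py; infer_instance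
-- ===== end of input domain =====

-- B replaces A's one-unit-at-a-time removal loop by closed-form ceiling-division arithmetic (objective: faster).

-- ===== PORT A =====
-- _fleet_cost helper
def pvFleetCost (light_count : Int) (heavy_count : Int) : Int :=
  light_count * 1000 + heavy_count * 1800

-- the while loop of A (terminates because light+heavy shrinks; the final
-- else branch is unreachable from the clamped entry point)
def pvRepairLoop (budget : Int) (light_count : Int) (heavy_count : Int) : Int × Int :=
  if pvFleetCost light_count heavy_count > budget ∧ light_count + heavy_count > 0 then
    if heavy_count > 0 then pvRepairLoop budget light_count (heavy_count - 1)
    else if light_count > 0 then pvRepairLoop budget (light_count - 1) heavy_count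
    else (light_count, heavy_count)
  else (light_count, heavy_count)
termination_by light_count.toNat + heavy_count.toNat
decreasing_by all_goals omega

def repair_chromosome_py (light_count : Int) (heavy_count : Int) (budget : Int) : Int × Int :=
  pvRepairLoop budget (max 0 light_count) (max 0 heavy_count)

-- ===== PORT B =====
-- _reduce helper of Source B: closed-form removal counts via ceiling division
def pvReduce (light_count : Int) (heavy_count : Int) (budget : Int) : Int × Int :=
  let ov := light_count * 1000 + heavy_count * 1800 - budget
  if ov > 0 then
    let k := min heavy_count (-(PySem.Int.floordiv (-ov) 1800))
    let heavy' := heavy_count - k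
    let ov2 := ov - k * 1800
    if ov2 > 0 then
      let m := min light_count (-(PySem.Int.floordiv (-ov2) 1000))
      (light_count - m, heavy')
    else (light_count, heavy')
  else (light_count, heavy_count)

def repair_chromosome_py_alt (light_count : Int) (heavy_count : Int) (budget : Int) : Int × Int :=
  pvReduce (max 0 light_count) (max 0 heavy_count) budget

-- ===== PRECONDITION & SPEC =====
def Spec_repair_chromosome_py (light_count : Int) (heavy_count : Int) (budget : Int) (out : Int × Int) : Prop := out = repair_chromosome_py_alt light_count heavy_count budget
instance (light_count : Int) (heavy_count : Int) (budget : Int) (out : Int × Int) : Decidable (Spec_repair_chromosome_py light_count heavy_count budget out) := by unfold Spec_repair_chromosome_py; infer_instance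

-- ===== CLAIM (what is proved, stated in full; the proofs are below) =====
def Claim_equal_repair_chromosome_py : Prop := ∀ (light_count : Int) (heavy_count : Int) (budget : Int), Dom_repair_chromosome_py light_count heavy_count budget → Spec_repair_chromosome_py light_count heavy_count budget (repair_chromosome_py light_count heavy_count budget)

-- ===== LEMMAS AND PROOFS =====

-- unfold pvReduce into pure ediv arithmetic (lets zeta-reduced, floordiv -> ediv)
lemma pvReduce_eq (l h b : Int) :
    pvReduce l h b =
      (if l * 1000 + h * 1800 - b > 0 then
         if l * 1000 + h * 1800 - b - (min h (-((-(l * 1000 + h * 1800 - b)) / 1800))) * 1800 > 0 then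
           (l - min l (-((-(l * 1000 + h * 1800 - b - (min h (-((-(l * 1000 + h * 1800 - b)) / 1800))) * 1800)) / 1000)),
            h - min h (-((-(l * 1000 + h * 1800 - b)) / 1800)))
         else (l, h - min h (-((-(l * 1000 + h * 1800 - b)) / 1800)))
       else (l, h)) := by
  simp only [pvReduce, PySem.Int.floordiv_eq_ediv_of_pos (by norm_num : (0:Int) < 1800),
    PySem.Int.floordiv_eq_ediv_of_pos (by norm_num : (0:Int) < 1000)]

lemma loop_eq_reduce (b : Int) : ∀ n (l h : Int), l.toNat + h.toNat = n → 0 ≤ l → 0 ≤ h →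
    pvRepairLoop b l h = pvReduce l h b := by
  intro n
  induction n using Nat.strong_induction_on with
  | _ n ih =>
    intro l h hn hl hh
    rw [pvRepairLoop, pvReduce_eq]
    by_cases hc : pvFleetCost l h > b ∧ l + h > 0
    · rw [if_pos hc]
      unfold pvFleetCost at hc
      by_cases hhp : h > 0
      · rw [if_pos hhp, ih (l.toNat + (h - 1).toNat) (by omega) l (h - 1) rfl hl (by omega),
          pvReduce_eq]
        simp only [min_def]; split_ifs <;> simp only [Prod.mk.injEq, true_and, and_true] <;> omega
      · rw [if_neg hhp]
        have hlp : l > 0 := by omega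
        rw [if_pos hlp, ih ((l - 1).toNat + h.toNat) (by omega) (l - 1) h rfl (by omega) hh,
          pvReduce_eq]
        simp only [min_def]; split_ifs <;> simp only [Prod.mk.injEq, true_and, and_true] <;> omega
    · rw [if_neg hc]
      unfold pvFleetCost at hc
      simp only [min_def]; split_ifs <;> simp only [Prod.mk.injEq, true_and, and_true] <;> omega

-- ===== VERDICT (by name: the statement is the Claim_ definition above) =====
theorem repair_chromosome_py_spec : Claim_equal_repair_chromosome_py := by
  intro l h b _
  unfold Spec_repair_chromosome_py repair_chromosome_py repair_chromosome_py_alt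
  exact loop_eq_reduce b _ (max 0 l) (max 0 h) rfl (le_max_left 0 l) (le_max_left 0 h)
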